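-- pv_equiv track=rewrite | github.com/ZhuofanShen/Rosetta-Enzyme-Design-Pipeline | design/generate_scores_table.py | read_annotated_sequence
-- ===== SOURCE A (Python) =====
-- def read_annotated_sequence(annotated_sequence, symmetric):
--     sequence = str()
--     annotation_dict = dict() # key of the dict is sequence string index
--     is_annotation = False
--     index_diff = 0
--     for index in range(len(annotated_sequence)):
--         if is_annotation:
--             index_diff += 1
--             if annotated_sequence[index] == ']':
--                 annotation_dict.update({str(index - index_diff): annotated_sequence[begin_index + 1:index]})
--                 is_annotation = False
--                 if symmetric and annotated_sequence[begin_index + 1:index].endswith(':CtermProteinFull'):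
--                     break
--         else:
--             if annotated_sequence[index] == '[':
--                 begin_index = index
--                 index_diff += 1
--                 is_annotation = True
--             else:
--                 sequence += annotated_sequence[index]
--     return sequence, annotation_dict
-- ===== SOURCE B (Python) =====
-- def read_annotated_sequence(annotated_sequence, symmetric):
--     sequence_parts = []
--     annotation_dict = {}
--     i = 0
--     n = len(annotated_sequence)
--     while i < n:
--         if annotated_sequence[i] == '[':
--             j = annotated_sequence.find(']', i + 1)
--             if j == -1:
--                 break
--             annotation = annotated_sequence[i + 1:j]
--             annotation_dict[str(len(sequence_parts) - 1)] = annotation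
--             if symmetric and annotation.endswith(':CtermProteinFull'):
--                 break
--             i = j + 1
--         else:
--             sequence_parts.append(annotated_sequence[i])
--             i += 1
--     return ''.join(sequence_parts), annotation_dict
-- ===== Notes on version B (the rewrite author's own statement) =====
-- stated objective: simpler
-- what changed: Replaces A's per-character is_annotation flag, index_diff counter and begin_index bookkeeping with a position pointer that jumps over each annotation via str.find(']', i+1) in one step and records it under str(len(sequence)-1).
import Mathlib
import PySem

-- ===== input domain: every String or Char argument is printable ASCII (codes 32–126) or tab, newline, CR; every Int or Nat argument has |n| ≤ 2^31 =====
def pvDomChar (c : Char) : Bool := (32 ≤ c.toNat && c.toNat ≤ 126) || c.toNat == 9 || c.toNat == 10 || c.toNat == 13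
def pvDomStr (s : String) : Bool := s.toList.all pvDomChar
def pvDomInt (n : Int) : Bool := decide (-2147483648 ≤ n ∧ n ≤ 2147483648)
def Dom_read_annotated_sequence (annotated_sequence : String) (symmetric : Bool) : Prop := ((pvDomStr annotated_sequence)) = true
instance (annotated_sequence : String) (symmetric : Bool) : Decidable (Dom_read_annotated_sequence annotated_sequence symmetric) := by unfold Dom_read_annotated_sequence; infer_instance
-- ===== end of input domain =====

-- B replaces A's per-character is_annotation flag / index_diff counter / begin_index bookkeeping
-- by consuming the string suffix: on '[' it jumps to the matching ']' with str.find and records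
-- the annotation under str(len(sequence)-1); objective: simpler.

-- ===== PORT A =====
-- loop over range(len(annotated_sequence)); state: sequence, dict, is_annotation, index_diff, begin_index
def pvA (cs : List Char) (index : Nat) (full : List Char) (symmetric : Bool)
    (sequence : List Char) (d : PySem.Dict String String) (isAnn : Bool) (indexDiff : Nat)
    (beginIndex : Nat) : List Char × PySem.Dict String String :=
  match cs with
  | [] => (sequence, d)
  | c :: rest =>
    if isAnn then
      let indexDiff' := indexDiff + 1
      if c = ']' then
        let ann := PySem.List.slice full (some ((beginIndex : Int) + 1)) (some (index : Int))
        let d' := d.insert (PySem.Int.toStr ((index : Int) - (indexDiff' : Int))) (String.ofList ann)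
        if symmetric && PySem.Chars.endswith ann ":CtermProteinFull".toList then (sequence, d')
        else pvA rest (index + 1) full symmetric sequence d' false indexDiff' beginIndex
      else pvA rest (index + 1) full symmetric sequence d true indexDiff' beginIndex
    else
      if c = '[' then pvA rest (index + 1) full symmetric sequence d true (indexDiff + 1) index
      else pvA rest (index + 1) full symmetric (sequence ++ [c]) d false indexDiff beginIndex

def read_annotated_sequence (annotated_sequence : String) (symmetric : Bool) :
    String × (List (String × String)) :=
  let r := pvA annotated_sequence.toList 0 annotated_sequence.toList symmetric []
    PySem.Dict.empty false 0 0
  (String.ofList r.1, r.2.items)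

-- ===== PORT B =====
-- the pointer i is represented by the remaining suffix rest = annotated_sequence[i:];
-- find(']', i+1) is Chars.find on the tail, the jump i = j+1 is the slice past that ']'
def pvB (rest : List Char) (symmetric : Bool) (sequence : List Char)
    (d : PySem.Dict String String) : List Char × PySem.Dict String String :=
  match rest with
  | [] => (sequence, d)
  | c :: tail =>
    if c = '[' then
      let j := PySem.Chars.find tail [']']
      if j = -1 then (sequence, d)
      else
        let ann := PySem.List.slice tail none (some j)
        let d' := d.insert (PySem.Int.toStr ((sequence.length : Int) - 1)) (String.ofList ann)
        if symmetric && PySem.Chars.endswith ann ":CtermProteinFull".toList then (sequence, d')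
        else pvB (PySem.List.slice tail (some (j + 1)) none) symmetric sequence d'
    else pvB tail symmetric (sequence ++ [c]) d
termination_by rest.length
decreasing_by
  all_goals simp_all [PySem.List.slice_some_none]

def read_annotated_sequence_alt (annotated_sequence : String) (symmetric : Bool) :
    String × (List (String × String)) :=
  let r := pvB annotated_sequence.toList symmetric [] PySem.Dict.empty
  (String.ofList r.1, r.2.items)

-- ===== PRECONDITION & SPEC =====
def Spec_read_annotated_sequence (annotated_sequence : String) (symmetric : Bool)
    (out : String × (List (String × String))) : Prop :=
  out = read_annotated_sequence_alt annotated_sequence symmetric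
instance (annotated_sequence : String) (symmetric : Bool) (out : String × (List (String × String))) : Decidable (Spec_read_annotated_sequence annotated_sequence symmetric out) := by unfold Spec_read_annotated_sequence; infer_instance

-- ===== CLAIM (what is proved, stated in full; the proofs are below) =====
def Claim_equal_read_annotated_sequence : Prop := ∀ (annotated_sequence : String) (symmetric : Bool), Dom_read_annotated_sequence annotated_sequence symmetric → Spec_read_annotated_sequence annotated_sequence symmetric (read_annotated_sequence annotated_sequence symmetric)

-- ===== LEMMAS AND PROOFS =====

-- find.go on a single-char needle, unfolded one step
theorem findgo_nil (k : Nat) : PySem.Chars.find.go [']'] [] k = -1 := rfl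

theorem findgo_cons (c : Char) (t : List Char) (k : Nat) :
    PySem.Chars.find.go [']'] (c :: t) k =
      if c = ']' then (k : Int) else PySem.Chars.find.go [']'] t (k + 1) := by
  rw [PySem.Chars.find.go.eq_2]
  by_cases h : c = ']'
  · simp only [List.isPrefixOf, h, Bool.and_eq_true, beq_iff_eq, if_true]
    simp
  · have h' : ¬ (']' = c) := fun hh => h hh.symm
    simp only [List.isPrefixOf, Bool.and_eq_true, beq_iff_eq, h, h', if_false]
    simp

theorem findgo_not_mem (s : List Char) (hs : ']' ∉ s) (k : Nat) :
    PySem.Chars.find.go [']'] s k = -1 := by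
  induction s generalizing k with
  | nil => exact findgo_nil k
  | cons c t ih =>
    rw [findgo_cons]
    simp only [List.mem_cons, not_or] at hs
    have hc : ¬ c = ']' := fun h => hs.1 h.symm
    simp [hc, ih hs.2]

theorem findgo_first (u v : List Char) (hu : ']' ∉ u) (k : Nat) :
    PySem.Chars.find.go [']'] (u ++ ']' :: v) k = ((k + u.length : Nat) : Int) := by
  induction u generalizing k with
  | nil => rw [List.nil_append, findgo_cons]; simp
  | cons c t ih =>
    simp only [List.mem_cons, not_or] at hu
    rw [List.cons_append, findgo_cons]
    have hc : ¬ c = ']' := fun h => hu.1 h.symm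
    simp only [hc, if_false, ih hu.2, List.length_cons]
    congr 1
    omega

theorem firstSplit (t : List Char) (h : ']' ∈ t) :
    ∃ u v, t = u ++ ']' :: v ∧ ']' ∉ u := by
  induction t with
  | nil => simp at h
  | cons c t ih =>
    by_cases hc : c = ']'
    · exact ⟨[], t, by simp [hc], by simp⟩
    · have hm : ']' ∈ t := by
        rcases List.mem_cons.mp h with h1 | h1
        · exact absurd h1.symm hc
        · exact h1
      obtain ⟨u, v, rfl, hu⟩ := ih hm
      exact ⟨c :: u, v, rfl, by simp [hu, Ne.symm hc]⟩

-- A's annotation-mode scan when no closing bracket remains: nothing more is recorded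
theorem innerA_none (cs : List Char) (hs : ']' ∉ cs) :
    ∀ (idx : Nat) (full : List Char) (sym : Bool) (seq : List Char)
      (d : PySem.Dict String String) (diff b : Nat),
    pvA cs idx full sym seq d true diff b = (seq, d) := by
  induction cs with
  | nil => intros; rfl
  | cons c t ih =>
    intro idx full sym seq d diff b
    simp only [List.mem_cons, not_or] at hs
    have hc : ¬ c = ']' := fun h => hs.1 h.symm
    rw [pvA]
    simp [hc, ih hs.2]

-- A's annotation-mode scan up to the first closing bracket
theorem innerA_found (u : List Char) (hu : ']' ∉ u) :
    ∀ (v : List Char) (idx : Nat) (full : List Char) (sym : Bool) (seq : List Char)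
      (d : PySem.Dict String String) (diff b : Nat),
    pvA (u ++ ']' :: v) idx full sym seq d true diff b =
      (let ann := PySem.List.slice full (some ((b : Int) + 1)) (some ((idx + u.length : Nat) : Int))
       let d' := d.insert (PySem.Int.toStr ((idx : Int) - (diff : Int) - 1)) (String.ofList ann)
       if sym && PySem.Chars.endswith ann ":CtermProteinFull".toList then (seq, d')
       else pvA v (idx + u.length + 1) full sym seq d' false (diff + u.length + 1) b) := by
  induction u with
  | nil =>
    intro v idx full sym seq d diff b
    rw [List.nil_append, pvA]
    have hkey : (idx : Int) - ((diff : Int) + 1) = (idx : Int) - (diff : Int) - 1 := by ring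
    simp [hkey]
  | cons c t ih =>
    intro v idx full sym seq d diff b
    simp only [List.mem_cons, not_or] at hu
    have hc : ¬ c = ']' := fun h => hu.1 h.symm
    rw [List.cons_append, pvA]
    simp only [if_true, hc, if_false]
    rw [ih hu.2]
    have h1 : ((idx + 1) + t.length : Nat) = (idx + (c :: t).length : Nat) := by simp; omega
    simp only [h1, List.length_cons]
    push_cast
    ring_nf

-- main loop correspondence
theorem mainLemma (n : Nat) :
    ∀ (cs : List Char) (idx : Nat) (full : List Char) (sym : Bool) (seq : List Char)
      (d : PySem.Dict String String) (diff b : Nat),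
    cs.length ≤ n → cs = full.drop idx → (idx : Int) - (diff : Int) = seq.length →
    pvA cs idx full sym seq d false diff b = pvB cs sym seq d := by
  induction n with
  | zero =>
    intro cs idx full sym seq d diff b hn _ _
    have hcs : cs = [] := List.eq_nil_of_length_eq_zero (Nat.le_zero.mp hn)
    subst hcs; rw [pvA, pvB]
  | succ n ih =>
    intro cs idx full sym seq d diff b hn hdrop hinv
    match cs, hdrop with
    | [], _ => rw [pvA, pvB]
    | c :: tail, hdrop =>
      have htail : tail = full.drop (idx + 1) := by
        have h := congrArg (List.drop 1) hdrop.symm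
        simpa [List.drop_drop, Nat.add_comm] using h.symm
      by_cases hc : c = '['
      · subst hc
        rw [pvA, pvB]
        simp only [Bool.false_eq_true, if_false, if_true]
        by_cases hm : ']' ∈ tail
        · obtain ⟨u, v, htl, hu⟩ := firstSplit tail hm
          subst htl
          have hfind : PySem.Chars.find (u ++ ']' :: v) [']'] = ((u.length : Nat) : Int) := by
            unfold PySem.Chars.find
            simpa using findgo_first u v hu 0
          have hne : ¬ (((u.length : Nat) : Int) = -1) := by omega
          rw [innerA_found u hu]
          simp only [hfind, hne, if_false]
          have hannB : PySem.List.slice (u ++ ']' :: v) none (some ((u.length : Nat) : Int)) = u := by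
            rw [PySem.List.slice_to_natCast]
            simp
          have hannA : PySem.List.slice full (some ((idx : Int) + 1))
              (some (((idx + 1) + u.length : Nat) : Int)) = u := by
            rw [show ((idx : Int) + 1) = ((idx + 1 : Nat) : Int) by push_cast; ring,
              PySem.List.slice_natCast, ← htail]
            simp
          have hkey : ((idx + 1 : Nat) : Int) - ((diff + 1 : Nat) : Int) - 1
              = ((seq.length : Nat) : Int) - 1 := by push_cast; push_cast at hinv; omega
          simp only [hannA, hannB, hkey, Bool.and_eq_true,
            show ":CtermProteinFull".toList = [':', 'C', 't', 'e', 'r', 'm', 'P', 'r', 'o', 't', 'e', 'i', 'n', 'F', 'u', 'l', 'l'] from by decide]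
          split_ifs with hend
          · rfl
          · have hdropv : PySem.List.slice (u ++ ']' :: v) (some (((u.length : Nat) : Int) + 1)) none = v := by
              rw [show (((u.length : Nat) : Int) + 1) = ((u.length + 1 : Nat) : Int) by push_cast; ring,
                PySem.List.slice_from_natCast,
                show u ++ ']' :: v = (u ++ [']']) ++ v by simp]
              simpa using List.drop_left (u ++ [']']) v
            rw [hdropv]
            apply ih v (idx + 1 + u.length + 1) full sym seq _ (diff + 1 + u.length + 1) idx
            · have := hn; simp only [List.length_cons, List.length_append] at this ⊢; omega
            · have h2 : ((u ++ [']']) ++ v).drop (u.length + 1) = v := List.drop_left' (by simp)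
              calc v = ((u ++ [']']) ++ v).drop (u.length + 1) := h2.symm
                _ = (u ++ ']' :: v).drop (u.length + 1) := by simp
                _ = (List.drop (idx + 1) full).drop (u.length + 1) := by rw [htail]
                _ = List.drop (idx + 1 + u.length + 1) full := by
                      rw [List.drop_drop, show idx + 1 + (u.length + 1) = idx + 1 + u.length + 1 from by omega]
            · push_cast; push_cast at hinv; omega
        · have hfind : PySem.Chars.find tail [']'] = -1 := by
            unfold PySem.Chars.find
            exact findgo_not_mem tail hm 0
          rw [innerA_none tail hm]
          simp [hfind]
      · rw [pvA, pvB]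
        simp only [hc, if_false]
        apply ih tail (idx + 1) full sym (seq ++ [c]) d diff b
        · simpa using Nat.le_of_succ_le_succ (by simpa using hn)
        · exact htail
        · simp only [List.length_append, List.length_cons, List.length_nil]
          push_cast; push_cast at hinv; omega

-- ===== VERDICT (by name: the statement is the Claim_ definition above) =====
theorem read_annotated_sequence_spec : Claim_equal_read_annotated_sequence := by
  intro s sym _
  unfold Spec_read_annotated_sequence read_annotated_sequence read_annotated_sequence_alt
  rw [mainLemma s.toList.length s.toList 0 s.toList sym [] PySem.Dict.empty 0 0 le_rfl (by simp) (by simp)]
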